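-- pv_equiv track=rewrite | github.com/fadilefdika/Quiz-Kriptografi | quiz_kriptografi.py | prepare_text
-- ===== SOURCE A (Python) =====
-- def prepare_text(text):
--     text = text.upper().replace("J", "I")
--     prepared = ""
--
--     i = 0
--     while i < len(text):
--         a = text[i]
--         b = text[i + 1] if i + 1 < len(text) else 'X'
--
--         if a == b:
--             prepared += a + 'X'
--             i += 1
--         else:
--             prepared += a + b
--             i += 2
--
--     if len(prepared) % 2 != 0:
--         prepared += 'X'
--
--     return prepared
-- ===== SOURCE B (Python) =====
-- def prepare_text(text):
--     text = text.upper().replace("J", "I")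
--     out = []
--     for c in text:
--         if len(out) % 2 == 1 and out[-1] == c:
--             out.append('X')
--         out.append(c)
--     if len(out) % 2 == 1:
--         out.append('X')
--     return ''.join(out)
-- ===== Notes on version B (the rewrite author's own statement) =====
-- stated objective: faster
-- what changed: Replaces the index-based pair scan with +1/+2 strides and quadratic string concatenation by a single left-to-right fold over characters that inserts the padding letter on a parity/last-char check into a list joined once at the end.
import Mathlib
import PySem

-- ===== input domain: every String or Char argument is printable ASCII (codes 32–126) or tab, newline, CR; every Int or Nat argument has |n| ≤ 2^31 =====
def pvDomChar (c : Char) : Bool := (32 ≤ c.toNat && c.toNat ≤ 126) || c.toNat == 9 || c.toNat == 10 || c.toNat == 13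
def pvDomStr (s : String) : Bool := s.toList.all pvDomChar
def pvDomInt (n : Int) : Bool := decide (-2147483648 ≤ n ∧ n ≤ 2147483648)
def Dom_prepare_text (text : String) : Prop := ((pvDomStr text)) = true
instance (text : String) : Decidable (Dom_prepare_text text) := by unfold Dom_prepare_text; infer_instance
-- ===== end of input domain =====

-- B replaces A's index-based pair scan (strides +1/+2) with a single left-to-right fold over
-- characters appending to a list joined once (A concatenates strings repeatedly); same return value on every input (objective: faster, measured).

-- ===== PORT A =====
-- the while loop: i advances by 1 (on a double) or by 2; recursion on the remaining suffix
def pvLoopA : List Char → List Char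
  | [] => []
  | a :: rest =>
    let b := rest.headD 'X'
    if a = b then a :: 'X' :: pvLoopA rest
    else a :: b :: pvLoopA (rest.drop 1)
termination_by l => l.length
decreasing_by all_goals (simp; try omega)


def prepare_text (text : String) : String :=
  let t := PySem.Chars.replace (PySem.Chars.upper text.toList) ['J'] ['I']
  let prepared := pvLoopA t
  let prepared := if prepared.length % 2 ≠ 0 then prepared ++ ['X'] else prepared
  String.mk prepared

-- ===== PORT B =====
-- one loop iteration of Source B: maybe insert 'X' (mid-pair double), then append c
def pvStepB (out : List Char) (c : Char) : List Char :=
  (if out.length % 2 == 1 && out.getLast? == some c then out ++ ['X'] else out) ++ [c]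


def prepare_text_alt (text : String) : String :=
  let t := PySem.Chars.replace (PySem.Chars.upper text.toList) ['J'] ['I']
  let out := t.foldl pvStepB []
  let out := if out.length % 2 == 1 then out ++ ['X'] else out
  String.mk out

-- ===== PRECONDITION & SPEC =====
def Spec_prepare_text (text : String) (out : String) : Prop := out = prepare_text_alt text
instance (text : String) (out : String) : Decidable (Spec_prepare_text text out) := by unfold Spec_prepare_text; infer_instance

-- ===== CLAIM (what is proved, stated in full; the proofs are below) =====
def Claim_equal_prepare_text : Prop := ∀ (text : String), Dom_prepare_text text → Spec_prepare_text text (prepare_text text)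

-- ===== LEMMAS AND PROOFS =====

-- structured form of B's fold: pvG starts a pair (even position), pvH l finishes one (l = last appended char)
mutual
def pvG : List Char → List Char
  | [] => []
  | a :: rest => a :: pvH a rest
def pvH : Char → List Char → List Char
  | _, [] => []
  | l, c :: rest => if l = c then 'X' :: c :: pvH c rest else c :: pvG rest
end

lemma pvFoldB_spec (t : List Char) :
    (∀ acc : List Char, acc.length % 2 = 0 → t.foldl pvStepB acc = acc ++ pvG t) ∧
    (∀ (acc : List Char) (l : Char), acc.getLast? = some l → acc.length % 2 = 1 →
      t.foldl pvStepB acc = acc ++ pvH l t) := by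
  induction t with
  | nil => simp [pvG, pvH]
  | cons a rest ih =>
    constructor
    · intro acc hacc
      have hstep : pvStepB acc a = acc ++ [a] := by simp [pvStepB, hacc]
      rw [List.foldl_cons, hstep,
        ih.2 (acc ++ [a]) a (by simp) (by simp [List.length_append]; omega)]
      simp [pvG]
    · intro acc l hlast hacc
      by_cases heq : l = a
      · have hstep : pvStepB acc a = acc ++ ['X', a] := by
          simp [pvStepB, hacc, hlast, heq]
        rw [List.foldl_cons, hstep,
          ih.2 (acc ++ ['X', a]) a (by simp) (by simp [List.length_append]; omega)]
        simp [pvH, heq]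
      · have hstep : pvStepB acc a = acc ++ [a] := by
          simp [pvStepB, hacc, hlast]
          intro h; exact absurd h heq
        rw [List.foldl_cons, hstep,
          ih.1 (acc ++ [a]) (by simp [List.length_append]; omega)]
        simp [pvH, heq]

lemma pvLoopA_even (t : List Char) : (pvLoopA t).length % 2 = 0 := by
  induction t using pvLoopA.induct with
  | case1 => simp [pvLoopA]
  | case2 rest b ih => rw [pvLoopA, if_pos rfl]; simp at ih ⊢; omega
  | case3 a rest b hne ih => rw [pvLoopA, if_neg hne]; simp at ih ⊢; omega

def pvPad (l : List Char) : List Char := if l.length % 2 = 1 then l ++ ['X'] else l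

lemma pvPad_cons_cons (x y : Char) (l : List Char) :
    pvPad (x :: y :: l) = x :: y :: pvPad l := by
  unfold pvPad
  split_ifs with h1 h2 h2 <;> simp_all <;> omega

lemma pvLoopA_eq_pad_g (t : List Char) : pvLoopA t = pvPad (pvG t) := by
  induction t using pvLoopA.induct with
  | case1 => simp [pvLoopA, pvG, pvPad]
  | case2 rest b ih =>
    rw [pvLoopA, if_pos rfl]
    cases rest with
    | nil =>
      rw [show b = 'X' from rfl]
      simp [pvLoopA, pvG, pvH, pvPad]
    | cons c rest' =>
      rw [show b = c from rfl, ih]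
      have h1 : pvG (c :: c :: rest') = c :: 'X' :: pvG (c :: rest') := by
        simp [pvG, pvH]
      rw [h1, pvPad_cons_cons]
  | case3 a rest b hne ih =>
    rw [pvLoopA, if_neg hne]
    cases rest with
    | nil =>
      simp [pvLoopA, pvG, pvH, pvPad]
    | cons c rest' =>
      have hb : b = c := rfl
      rw [hb] at hne
      simp only [List.headD, List.drop_succ_cons, List.drop_zero] at ih ⊢
      have h1 : pvG (a :: c :: rest') = a :: c :: pvG rest' := by
        simp [pvG, pvH, hne]
      rw [ih, h1, pvPad_cons_cons]

theorem pvKey (t : List Char) :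
    String.mk (if (pvLoopA t).length % 2 ≠ 0 then pvLoopA t ++ ['X'] else pvLoopA t)
      = String.mk (if (t.foldl pvStepB []).length % 2 == 1
          then t.foldl pvStepB [] ++ ['X'] else t.foldl pvStepB []) := by
  have hfold : t.foldl pvStepB [] = pvG t := by
    simpa using (pvFoldB_spec t).1 [] (by simp)
  rw [hfold, if_neg (by simp [pvLoopA_even t]), pvLoopA_eq_pad_g]
  unfold pvPad
  rcases Nat.mod_two_eq_zero_or_one (pvG t).length with h | h <;> simp [h]

-- ===== VERDICT (by name: the statement is the Claim_ definition above) =====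
theorem prepare_text_spec : Claim_equal_prepare_text := by
  intro text _
  unfold Spec_prepare_text prepare_text prepare_text_alt
  exact pvKey (PySem.Chars.replace (PySem.Chars.upper text.toList) ['J'] ['I'])
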